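-- pv_equiv track=rewrite | github.com/laceth/testpulse-proto | testpulse/tools/mermaid_timeline.py | _collect_framework
-- ===== SOURCE A (Python) =====
-- def _collect_framework(timeline: list[dict]) -> list[dict]:
--     """Collect framework verification events, deduplicated.
--
--     Reorders so that checks/state come before the verdict.
--     """
--     checks: list[dict] = []
--     verdicts: list[dict] = []
--     seen: set[str] = set()
--     verdict_kinds = {
--         "FRAMEWORK_ALL_CHECKS_PASSED",
--         "FRAMEWORK_TEST_PASSED",
--         "FRAMEWORK_TEST_FAILED",
--     }
--     for ev in timeline:
--         kind = ev.get("kind", "")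
--         if not kind.startswith("FRAMEWORK_"):
--             continue
--         pf = ev.get("property_field", "")
--         pv = ev.get("property_value", "")
--         key = f"{kind}|{pf}|{pv}"
--         if key in seen:
--             continue
--         seen.add(key)
--         if kind in verdict_kinds:
--             verdicts.append(ev)
--         else:
--             checks.append(ev)
--     return checks + verdicts
-- ===== SOURCE B (Python) =====
-- def _collect_framework(timeline: list[dict]) -> list[dict]:
--     """Filter, dedup by scanning the kept output (no set), then stable-sort by bucket.
--
--     Checks-before-verdict ordering comes from a stable sort on the boolean
--     'is verdict' key instead of two bucket lists.
--     """
--     verdict_kinds = {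
--         "FRAMEWORK_ALL_CHECKS_PASSED",
--         "FRAMEWORK_TEST_PASSED",
--         "FRAMEWORK_TEST_FAILED",
--     }
--
--     def key(ev):
--         return f'{ev.get("kind", "")}|{ev.get("property_field", "")}|{ev.get("property_value", "")}'
--
--     fw = [ev for ev in timeline if ev.get("kind", "").startswith("FRAMEWORK_")]
--     kept: list[dict] = []
--     for ev in fw:
--         if all(key(e) != key(ev) for e in kept):
--             kept.append(ev)
--     return sorted(kept, key=lambda ev: ev.get("kind", "") in verdict_kinds)
-- ===== Notes on version B (the rewrite author's own statement) =====
-- stated objective: alternative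
-- what changed: B replaces A's single interleaved set-dedup + two-bucket loop by three stages: a filter for FRAMEWORK_ events, a quadratic first-occurrence dedup that scans the kept output instead of maintaining a hash set, and a stable sort on the boolean 'is verdict' key instead of bucket lists and concatenation.
import Mathlib
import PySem

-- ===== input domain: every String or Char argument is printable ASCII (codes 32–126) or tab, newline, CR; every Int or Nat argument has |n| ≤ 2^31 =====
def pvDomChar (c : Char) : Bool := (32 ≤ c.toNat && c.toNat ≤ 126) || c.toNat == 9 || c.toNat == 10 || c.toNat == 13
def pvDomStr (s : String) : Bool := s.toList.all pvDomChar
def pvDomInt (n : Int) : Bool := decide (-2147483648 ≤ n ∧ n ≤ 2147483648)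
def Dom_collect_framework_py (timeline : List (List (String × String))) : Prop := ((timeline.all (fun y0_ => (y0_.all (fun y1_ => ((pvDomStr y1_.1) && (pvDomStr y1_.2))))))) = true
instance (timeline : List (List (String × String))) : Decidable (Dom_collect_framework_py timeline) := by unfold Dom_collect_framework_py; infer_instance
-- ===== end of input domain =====

-- B restructures A into filter / scan-back dedup / stable sort by bucket; the return value is identical and nothing is mutated.

-- ===== PORT A =====
-- shared literal constants of both Pythons
def pvVerdictKinds : PySem.Set String :=
  PySem.Set.ofList ["FRAMEWORK_ALL_CHECKS_PASSED", "FRAMEWORK_TEST_PASSED", "FRAMEWORK_TEST_FAILED"]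

-- ev.get(k, "") — dict lookup with default on the association list
def pvEvGetD (ev : List (String × String)) (k : String) : String :=
  PySem.Dict.getD (PySem.Dict.mk ev) k ""

-- key = f"{kind}|{pf}|{pv}"
def pvKey (ev : List (String × String)) : String :=
  pvEvGetD ev "kind" ++ "|" ++ pvEvGetD ev "property_field" ++ "|" ++ pvEvGetD ev "property_value"

-- A's single loop, carried state (checks, verdicts, seen)
def pvLoopA : List (List (String × String)) → List (List (String × String)) →
    List (List (String × String)) → PySem.Set String → List (List (String × String))
  | [], checks, verdicts, _ => checks ++ verdicts
  | ev :: rest, checks, verdicts, seen =>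
    let kind := pvEvGetD ev "kind"
    if ¬ (PySem.Str.startswith kind "FRAMEWORK_" = true) then
      pvLoopA rest checks verdicts seen
    else
      let key := pvKey ev
      if PySem.Set.contains seen key = true then
        pvLoopA rest checks verdicts seen
      else
        let seen' := PySem.Set.add seen key
        if PySem.Set.contains pvVerdictKinds kind = true then
          pvLoopA rest checks (verdicts ++ [ev]) seen'
        else
          pvLoopA rest (checks ++ [ev]) verdicts seen'

def collect_framework_py (timeline : List (List (String × String))) : List (List (String × String)) :=
  pvLoopA timeline [] [] PySem.Set.empty

-- ===== PORT B =====
-- ev.get("kind","") in verdict_kinds — the boolean sort key of B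
def pvIsVerdict (ev : List (String × String)) : Bool :=
  PySem.Set.contains pvVerdictKinds (pvEvGetD ev "kind")

-- B's dedup loop: keep ev iff no already-kept event has the same key (scans the output, no set)
def pvKeptLoop : List (List (String × String)) → List (List (String × String)) → List (List (String × String))
  | [], acc => acc
  | ev :: rest, acc =>
    if acc.all (fun e => !(pvKey e == pvKey ev)) then
      pvKeptLoop rest (acc ++ [ev])
    else
      pvKeptLoop rest acc

def collect_framework_py_alt (timeline : List (List (String × String))) : List (List (String × String)) :=
  let fw := timeline.filter (fun ev => PySem.Str.startswith (pvEvGetD ev "kind") "FRAMEWORK_")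
  let kept := pvKeptLoop fw []
  PySem.List.sorted kept pvIsVerdict false

-- ===== PRECONDITION & SPEC =====
def Spec_collect_framework_py (timeline : List (List (String × String))) (out : List (List (String × String))) : Prop := out = collect_framework_py_alt timeline
instance (timeline : List (List (String × String))) (out : List (List (String × String))) : Decidable (Spec_collect_framework_py timeline out) := by unfold Spec_collect_framework_py; infer_instance

-- ===== CLAIM (what is proved, stated in full; the proofs are below) =====
def Claim_equal_collect_framework_py : Prop := ∀ (timeline : List (List (String × String))), Dom_collect_framework_py timeline → Spec_collect_framework_py timeline (collect_framework_py timeline)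

-- ===== LEMMAS AND PROOFS =====
-- proof-only helper: seen-set dedup over an already-filtered list
def pvDedup2 : List (List (String × String)) → PySem.Set String → List (List (String × String))
  | [], _ => []
  | ev :: rest, seen =>
    if PySem.Set.contains seen (pvKey ev) = true then
      pvDedup2 rest seen
    else
      ev :: pvDedup2 rest (PySem.Set.add seen (pvKey ev))

-- A's loop equals: dedup the filtered list, then append the two bucket filters after the accumulators.
theorem pvLoopA_eq (ts : List (List (String × String)))
    (checks verdicts : List (List (String × String))) (seen : PySem.Set String) :
    pvLoopA ts checks verdicts seen =
      (checks ++ (pvDedup2 (ts.filter (fun ev => PySem.Str.startswith (pvEvGetD ev "kind") "FRAMEWORK_")) seen).filter (fun ev => ! pvIsVerdict ev)) ++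
      (verdicts ++ (pvDedup2 (ts.filter (fun ev => PySem.Str.startswith (pvEvGetD ev "kind") "FRAMEWORK_")) seen).filter (fun ev => pvIsVerdict ev)) := by
  induction ts generalizing checks verdicts seen with
  | nil => simp [pvLoopA, pvDedup2]
  | cons ev rest ih =>
    simp only [pvLoopA, List.filter_cons]
    split_ifs with h1 h2 h3 <;>
      simp_all [pvDedup2, pvIsVerdict]

-- B's scan-back dedup equals the seen-set dedup, under the invariant that
-- the seen-set holds exactly the keys of the accumulator.
theorem pvKeptLoop_eq (l : List (List (String × String)))
    (acc : List (List (String × String))) (seen : PySem.Set String)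
    (hinv : ∀ k, PySem.Set.contains seen k = true ↔ ∃ e ∈ acc, pvKey e = k) :
    pvKeptLoop l acc = acc ++ pvDedup2 l seen := by
  induction l generalizing acc seen with
  | nil => simp [pvKeptLoop, pvDedup2]
  | cons ev rest ih =>
    simp only [pvKeptLoop, pvDedup2]
    have hmem : (acc.all (fun e => !(pvKey e == pvKey ev))) = true ↔
        ¬ PySem.Set.contains seen (pvKey ev) = true := by
      rw [hinv]
      simp [List.all_eq_true]
    by_cases hc : PySem.Set.contains seen (pvKey ev) = true
    · rw [if_neg (fun h => (hmem.mp h) hc), if_pos hc]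
      exact ih acc seen hinv
    · rw [if_pos (hmem.mpr hc), if_neg hc]
      rw [ih (acc ++ [ev]) (PySem.Set.add seen (pvKey ev))]
      · simp
      · intro k
        rw [PySem.Set.contains_iff, PySem.Set.mem_add, ← PySem.Set.contains_iff, hinv]
        constructor
        · rintro (⟨e, he, hk⟩ | rfl)
          · exact ⟨e, by simp [he], hk⟩
          · exact ⟨ev, by simp, rfl⟩
        · rintro ⟨e, he, hk⟩
          rcases List.mem_append.mp he with h' | h'
          · exact Or.inl ⟨e, h', hk⟩
          · simp at h'; subst h'; exact Or.inr hk.symm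

-- insertion into a (falses ++ trues) list by the Bool key: stable placement
theorem pvInsert_bool (x : List (String × String))
    (fs ts : List (List (String × String)))
    (hfs : ∀ e ∈ fs, pvIsVerdict e = false) (hts : ∀ e ∈ ts, pvIsVerdict e = true) :
    PySem.List.insertBy (fun a b => decide (pvIsVerdict a < pvIsVerdict b)) x (fs ++ ts) =
      if pvIsVerdict x then fs ++ ts ++ [x] else fs ++ x :: ts := by
  induction fs with
  | nil =>
    induction ts with
    | nil => cases h : pvIsVerdict x <;> simp [PySem.List.insertBy]
    | cons t ts' iht =>
      have ht := hts t (by simp)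
      cases h : pvIsVerdict x
      · simp [PySem.List.insertBy, h, ht]
      · simp only [List.nil_append] at iht ⊢
        simp [PySem.List.insertBy, h, ht, iht (fun e he => hts e (by simp [he]))]
  | cons f fs' ihf =>
    have hf := hfs f (by simp)
    have := ihf (fun e he => hfs e (by simp [he]))
    cases h : pvIsVerdict x <;>
      simp_all [PySem.List.insertBy]

-- the stable insertion sort on the Bool key is the (falses, trues) partition
theorem pvFoldIns_bool (xs fs ts : List (List (String × String)))
    (hfs : ∀ e ∈ fs, pvIsVerdict e = false) (hts : ∀ e ∈ ts, pvIsVerdict e = true) :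
    xs.foldl (fun acc x => PySem.List.insertBy (fun a b => decide (pvIsVerdict a < pvIsVerdict b)) x acc) (fs ++ ts) =
      (fs ++ xs.filter (fun e => ! pvIsVerdict e)) ++ (ts ++ xs.filter (fun e => pvIsVerdict e)) := by
  induction xs generalizing fs ts with
  | nil => simp
  | cons x rest ih =>
    simp only [List.foldl_cons, List.filter_cons]
    rw [pvInsert_bool x fs ts hfs hts]
    cases h : pvIsVerdict x
    · have := ih (fs ++ [x]) ts
        (by intro e he; rcases List.mem_append.mp he with h' | h'
            · exact hfs e h'
            · simp at h'; subst h'; exact h) hts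
      simpa using this
    · have := ih fs (ts ++ [x]) hfs
        (by intro e he; rcases List.mem_append.mp he with h' | h'
            · exact hts e h'
            · simp at h'; subst h'; exact h)
      simpa using this

theorem pvSorted_bool (xs : List (List (String × String))) :
    PySem.List.sorted xs pvIsVerdict false =
      xs.filter (fun e => ! pvIsVerdict e) ++ xs.filter (fun e => pvIsVerdict e) := by
  rw [PySem.List.sorted_eq_foldl_insertBy]
  simpa using pvFoldIns_bool xs [] [] (by simp) (by simp)

-- ===== VERDICT (by name: the statement is the Claim_ definition above) =====
theorem collect_framework_py_spec : Claim_equal_collect_framework_py := by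
  intro timeline _
  unfold Spec_collect_framework_py collect_framework_py collect_framework_py_alt
  rw [pvLoopA_eq, pvSorted_bool,
    pvKeptLoop_eq _ [] PySem.Set.empty (by intro k; simp [PySem.Set.contains])]
  simp
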